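-- pv_equiv track=rewrite | github.com/davidhacking/diff | algo.py | calc_col_status_table
-- ===== SOURCE A (Python) =====
-- def cmp(a, b):
--         return (a > b) - (a < b)
--
-- def lcsV2(A, B):
-- 	sup = []
-- 	m = len(A) + 1
-- 	n = len(B) + 1
-- 	for i in range(m):
-- 		sup.append([])
-- 		for j in range(n):
-- 			sup[i].append(0)
-- 	for i in range(1, m):
-- 		for j in range(1, n):
-- 			if A[i - 1] == B[j - 1] and A[i - 1] != '' and B[j - 1] != '':
-- 				sup[i][j] = sup[i - 1][j - 1] + 1
-- 			elif sup[i - 1][j] >= sup[i][j - 1]: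
-- 				sup[i][j] = sup[i - 1][j]
-- 			else:
-- 				sup[i][j] = sup[i][j - 1]
-- 	return sup[m - 1][n - 1]
--
-- def lcsV3(A, B):
-- 	if cmp(A, B) == 0:
-- 		return len(A)
-- 	else:
-- 		return lcsV2(A, B)
--
-- def column(matrix, i):
--     return [row[i] for row in matrix]
--
-- def calc_col_status_table(a, b):
-- 	cst = {};
-- 	i = 0;
-- 	if len(a) > 0:
-- 		for x in range(len(a[0])):
-- 			res = [0, -1]
-- 			if len(b) > 0:
-- 				for y in range(i, len(b[0])):
-- 					lenA = len(column(a, x))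
-- 					lenB = len(column(b, y))
-- 					# t = lcs(column(a, x), column(b, y), lenA, lenB)
-- 					t = lcsV3(column(a, x), column(b, y))
-- 					if res[0] < t:
-- 						res[0] = t
-- 						res[1] = y
-- 					if t == lenA or t == lenB:
-- 						break
-- 				if res[0] > 0:
-- 					cst[x] = [res[1], res[0]]
-- 					i = res[1] + 1
-- 	return cst
-- ===== SOURCE B (Python) =====
-- def _lcs(A, B):
--     # equal columns short-circuit (mirrors lcsV3); otherwise top-down memoized LCS,
--     # where '' never matches anything
--     if A == B:
--         return len(A)
--     memo = {}
--     def go(i, j):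
--         if i == 0 or j == 0:
--             return 0
--         key = (i, j)
--         v = memo.get(key)
--         if v is not None:
--             return v
--         if A[i - 1] == B[j - 1] and A[i - 1] != '':
--             v = go(i - 1, j - 1) + 1
--         else:
--             v = max(go(i - 1, j), go(i, j - 1))
--         memo[key] = v
--         return v
--     return go(len(A), len(B))
--
--
-- def calc_col_status_table(a, b):
--     cst = {}
--     if not a or not b:
--         return cst
--     cols_a = [[row[x] for row in a] for x in range(len(a[0]))]
--     cols_b = [[row[y] for row in b] for y in range(len(b[0]))]
--     i = 0
--     for x in range(len(cols_a)):
--         col_a = cols_a[x]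
--         len_a = len(col_a)
--         best, best_y = 0, -1
--         for y in range(i, len(cols_b)):
--             col_b = cols_b[y]
--             t = _lcs(col_a, col_b)
--             if best < t:
--                 best, best_y = t, y
--             if t == len_a or t == len(col_b):
--                 break
--         if best > 0:
--             cst[x] = [best_y, best]
--             i = best_y + 1
--     return cst
-- ===== Notes on version B (the rewrite author's own statement) =====
-- stated objective: alternative
-- what changed: B computes each LCS by a top-down memoized recursion (dict cache) instead of A's bottom-up full DP table, drops the cmp helper in favour of a direct equality shortcut, and extracts each matrix's columns once up front instead of rebuilding column(a,x)/column(b,y) inside the inner loop on every iteration.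
-- outside the precondition, e.g. on calc_col_status_table([['x']], [['x', 'y'], ['?']]): A returns {0: [0, 1]}, B raises IndexError
import Mathlib
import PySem

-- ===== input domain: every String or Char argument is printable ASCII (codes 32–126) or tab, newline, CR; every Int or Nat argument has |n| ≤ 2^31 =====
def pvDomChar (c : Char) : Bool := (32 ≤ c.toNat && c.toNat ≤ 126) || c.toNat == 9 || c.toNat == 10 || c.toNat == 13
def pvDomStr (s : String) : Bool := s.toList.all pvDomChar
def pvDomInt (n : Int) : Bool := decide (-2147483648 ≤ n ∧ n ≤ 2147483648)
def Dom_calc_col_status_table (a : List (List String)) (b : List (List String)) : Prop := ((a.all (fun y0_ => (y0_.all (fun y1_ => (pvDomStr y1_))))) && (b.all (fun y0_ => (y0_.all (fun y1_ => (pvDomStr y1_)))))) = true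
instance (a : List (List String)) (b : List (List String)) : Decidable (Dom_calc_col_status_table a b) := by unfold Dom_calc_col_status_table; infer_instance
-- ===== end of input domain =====

-- B replaces A's bottom-up LCS table (lcsV2) by a top-down memoized recursion and
-- extracts each matrix's columns once up front instead of rebuilding them in the inner loop
-- (objective: alternative decomposition, same results).

-- ===== PORT A =====

-- Python's '<' on lists of strings (lexicographic; Lean's String '<' is Python's code-point order)
def pyListLt : List String → List String → Bool
  | _, [] => false
  | [], _ :: _ => true
  | x :: xs, y :: ys => if x < y then true else if y < x then false else pyListLt xs ys

def pyCmp (A B : List String) : Int :=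
  (if pyListLt B A then (1 : Int) else 0) - (if pyListLt A B then (1 : Int) else 0)

-- sup[i][j] read / write (indices are always in range when reached; default never used)
def g2 (sup : List (List Int)) (i j : Nat) : Int := (sup.getD i []).getD j 0
def set2 (sup : List (List Int)) (i j : Nat) (v : Int) : List (List Int) :=
  sup.set i ((sup.getD i []).set j v)

def lcsV2 (A B : List String) : Int :=
  let m := A.length + 1
  let n := B.length + 1
  let sup : List (List Int) :=
    (List.range m).foldl
      (fun s _ => s ++ [(List.range n).foldl (fun r _ => r ++ [(0 : Int)]) []]) []
  let sup :=
    (List.range' 1 (m - 1)).foldl (fun s i =>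
      (List.range' 1 (n - 1)).foldl (fun s j =>
        if A.getD (i - 1) "" = B.getD (j - 1) "" ∧ A.getD (i - 1) "" ≠ "" ∧ B.getD (j - 1) "" ≠ "" then
          set2 s i j (g2 s (i - 1) (j - 1) + 1)
        else if g2 s (i - 1) j ≥ g2 s i (j - 1) then
          set2 s i j (g2 s (i - 1) j)
        else
          set2 s i j (g2 s i (j - 1))) s) sup
  g2 sup (m - 1) (n - 1)

def lcsV3 (A B : List String) : Int :=
  if pyCmp A B = 0 then (A.length : Int) else lcsV2 A B

def column (matrix : List (List String)) (i : Nat) : List String :=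
  matrix.map (fun row => row.getD i "")

def calc_col_status_table (a : List (List String)) (b : List (List String)) : List (Int × List Int) :=
  match a with
  | [] => []
  | a0 :: _ =>
    ((List.range a0.length).foldl (fun (st : List (Int × List Int) × Nat) x =>
      match b with
      | [] => st
      | b0 :: _ =>
        let inner := (List.range' st.2 (b0.length - st.2)).foldl (fun (s : Int × Int × Bool) y =>
          if s.2.2 then s else
          let lenA : Int := (column a x).length
          let lenB : Int := (column b y).length
          let t := lcsV3 (column a x) (column b y)
          let s' := if s.1 < t then (t, (y : Int), s.2.2) else s
          if t = lenA ∨ t = lenB then (s'.1, s'.2.1, true) else s') ((0 : Int), (-1 : Int), false)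
        if inner.1 > 0 then (st.1 ++ [((x : Int), [inner.2.1, inner.1])], (inner.2.1 + 1).toNat)
        else st) ([], 0)).1

-- ===== PORT B =====

def lcsMemoGo (A B : List String) (i j : Nat) (memo : PySem.Dict (Nat × Nat) Int) :
    Int × PySem.Dict (Nat × Nat) Int :=
  if i = 0 ∨ j = 0 then (0, memo)
  else
    match memo.get? (i, j) with
    | some v => (v, memo)
    | none =>
      let p :=
        if A.getD (i - 1) "" = B.getD (j - 1) "" ∧ A.getD (i - 1) "" ≠ "" then
          let q := lcsMemoGo A B (i - 1) (j - 1) memo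
          (q.1 + 1, q.2)
        else
          let q1 := lcsMemoGo A B (i - 1) j memo
          let q2 := lcsMemoGo A B i (j - 1) q1.2
          (max q1.1 q2.1, q2.2)
      (p.1, p.2.insert (i, j) p.1)
termination_by (i, j)
decreasing_by all_goals omega

def lcs_alt (A B : List String) : Int :=
  if A = B then (A.length : Int)
  else (lcsMemoGo A B A.length B.length PySem.Dict.empty).1

def calc_col_status_table_alt (a : List (List String)) (b : List (List String)) : List (Int × List Int) :=
  match a, b with
  | [], _ => []
  | _ :: _, [] => []
  | a0 :: _, b0 :: _ =>
    let colsA := (List.range a0.length).map (fun x => a.map (fun row => row.getD x ""))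
    let colsB := (List.range b0.length).map (fun y => b.map (fun row => row.getD y ""))
    ((List.range colsA.length).foldl (fun (st : List (Int × List Int) × Nat) x =>
      let colA := colsA.getD x []
      let lenA : Int := colA.length
      let inner := (List.range' st.2 (colsB.length - st.2)).foldl (fun (s : Int × Int × Bool) y =>
        if s.2.2 then s else
        let colB := colsB.getD y []
        let t := lcs_alt colA colB
        let s' := if s.1 < t then (t, (y : Int), s.2.2) else s
        if t = lenA ∨ t = (colB.length : Int) then (s'.1, s'.2.1, true) else s') ((0 : Int), (-1 : Int), false)
      if inner.1 > 0 then (st.1 ++ [((x : Int), [inner.2.1, inner.1])], (inner.2.1 + 1).toNat)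
      else st) ([], 0)).1

-- ===== PRECONDITION & SPEC =====
-- Pre_ excludes ragged inputs (a row shorter than row 0) when both matrices are nonempty:
-- there column extraction hits an IndexError (in A except when an early break leaves the short
-- row unread and A still returns; B extracts all columns eagerly and raises).
def Pre_calc_col_status_table (a : List (List String)) (b : List (List String)) : Prop :=
  a = [] ∨ b = [] ∨
    ((∀ r ∈ a, (a.headD []).length ≤ r.length) ∧ (∀ r ∈ b, (b.headD []).length ≤ r.length))
instance (a : List (List String)) (b : List (List String)) : Decidable (Pre_calc_col_status_table a b) := by
  unfold Pre_calc_col_status_table; infer_instance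

def pvWitness_calc_col_status_table : List (List String) × List (List String) :=
  ([["x", "u"], ["y", "v"]], [["u"], ["v"]])

def Spec_calc_col_status_table (a : List (List String)) (b : List (List String)) (out : List (Int × List Int)) : Prop := out = calc_col_status_table_alt a b
instance (a : List (List String)) (b : List (List String)) (out : List (Int × List Int)) : Decidable (Spec_calc_col_status_table a b out) := by unfold Spec_calc_col_status_table; infer_instance

-- ===== CLAIM (what is proved, stated in full; the proofs are below) =====
def Claim_equal_calc_col_status_table : Prop := ∀ (a : List (List String)) (b : List (List String)), Dom_calc_col_status_table a b → Pre_calc_col_status_table a b → Spec_calc_col_status_table a b (calc_col_status_table a b)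

-- ===== LEMMAS AND PROOFS =====

-- ---- helper: the recursive LCS value both versions compute ----
def LL (A B : List String) (i j : Nat) : Int :=
  if i = 0 ∨ j = 0 then 0
  else if A.getD (i - 1) "" = B.getD (j - 1) "" ∧ A.getD (i - 1) "" ≠ "" then
    LL A B (i - 1) (j - 1) + 1
  else
    max (LL A B (i - 1) j) (LL A B i (j - 1))
termination_by (i, j)
decreasing_by all_goals omega

theorem LL_base (A B : List String) {i j : Nat} (h : i = 0 ∨ j = 0) : LL A B i j = 0 := by
  rw [LL, if_pos h]

theorem LL_match (A B : List String) {i j : Nat} (h0 : ¬(i = 0 ∨ j = 0))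
    (hc : A.getD (i - 1) "" = B.getD (j - 1) "" ∧ A.getD (i - 1) "" ≠ "") :
    LL A B i j = LL A B (i - 1) (j - 1) + 1 := by
  rw [LL, if_neg h0, if_pos hc]

theorem LL_nomatch (A B : List String) {i j : Nat} (h0 : ¬(i = 0 ∨ j = 0))
    (hc : ¬(A.getD (i - 1) "" = B.getD (j - 1) "" ∧ A.getD (i - 1) "" ≠ "")) :
    LL A B i j = max (LL A B (i - 1) j) (LL A B i (j - 1)) := by
  rw [LL, if_neg h0, if_neg hc]

-- ---- Python list '<' facts, for cmp == 0 ----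
theorem pyListLt_self (A : List String) : pyListLt A A = false := by
  induction A with
  | nil => rfl
  | cons x xs ih => simp [pyListLt, ih]

theorem pyListLt_asymm {A B : List String} (h : pyListLt A B = true) : pyListLt B A = false := by
  induction A generalizing B with
  | nil =>
    cases B with
    | nil => simp [pyListLt] at h
    | cons y ys => simp [pyListLt]
  | cons x xs ih =>
    cases B with
    | nil => simp [pyListLt] at h
    | cons y ys =>
      simp only [pyListLt] at h ⊢
      by_cases hxy : x < y
      · simp [hxy, lt_asymm hxy]
      · by_cases hyx : y < x
        · simp [hxy, hyx] at h
        · simp only [hxy, hyx, if_false] at h ⊢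
          exact ih h

theorem eq_of_not_pyListLt {A B : List String} (h1 : pyListLt A B = false)
    (h2 : pyListLt B A = false) : A = B := by
  induction A generalizing B with
  | nil =>
    cases B with
    | nil => rfl
    | cons y ys => simp [pyListLt] at h1
  | cons x xs ih =>
    cases B with
    | nil => simp [pyListLt] at h2
    | cons y ys =>
      simp only [pyListLt] at h1 h2
      by_cases hxy : x < y
      · simp [hxy] at h1
      · by_cases hyx : y < x
        · simp [hyx] at h2
        · have hx : x = y := le_antisymm (not_lt.mp hyx) (not_lt.mp hxy)
          simp only [hxy, hyx, if_false] at h1 h2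
          rw [hx, ih h1 h2]

theorem pyCmp_eq_zero_iff (A B : List String) : pyCmp A B = 0 ↔ A = B := by
  constructor
  · intro h
    unfold pyCmp at h
    cases h1 : pyListLt A B with
    | true => rw [pyListLt_asymm h1, h1] at h; simp at h
    | false =>
      cases h2 : pyListLt B A with
      | true => rw [h1, h2] at h; simp at h
      | false => exact eq_of_not_pyListLt h1 h2
  · rintro rfl
    simp [pyCmp, pyListLt_self]

-- ---- the DP table of lcsV2 row by row ----
def LLrow (A B : List String) (n i : Nat) : List Int :=
  (List.range n).map (fun j => LL A B i j)

def LLpart (A B : List String) (n i k : Nat) : List Int :=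
  (List.range n).map (fun j => if j ≤ k then LL A B i j else 0)

theorem LLrow_zero (A B : List String) (n : Nat) : LLrow A B n 0 = List.replicate n 0 := by
  unfold LLrow
  rw [List.eq_replicate_iff]
  constructor
  · simp
  · intro v hv
    obtain ⟨j, _, rfl⟩ := List.mem_map.mp hv
    exact LL_base A B (Or.inl rfl)

theorem LLpart_zero (A B : List String) (n i : Nat) : LLpart A B n i 0 = List.replicate n 0 := by
  unfold LLpart
  rw [List.eq_replicate_iff]
  constructor
  · simp
  · intro v hv
    obtain ⟨j, _, rfl⟩ := List.mem_map.mp hv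
    split
    · next hj => rw [Nat.le_zero.mp hj]; exact LL_base A B (Or.inr rfl)
    · rfl

theorem LLpart_last (A B : List String) (n i : Nat) (hn : 1 ≤ n) :
    LLpart A B n i (n - 1) = LLrow A B n i := by
  unfold LLpart LLrow
  apply List.map_congr_left
  intro j hj
  have : j < n := List.mem_range.mp hj
  rw [if_pos (by omega)]

theorem LLpart_set (A B : List String) (n i k : Nat) (_h : k + 1 < n) :
    (LLpart A B n i k).set (k + 1) (LL A B i (k + 1)) = LLpart A B n i (k + 1) := by
  apply List.ext_getElem
  · simp [LLpart]
  · intro j h1 h2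
    have hj : j < n := by simpa [LLpart] using h2
    rw [List.getElem_set]
    unfold LLpart
    simp only [List.getElem_map, List.getElem_range]
    by_cases hjk : k + 1 = j
    · subst hjk
      rw [if_pos rfl, if_pos (le_refl _)]
    · rw [if_neg hjk]
      by_cases hle : j ≤ k
      · rw [if_pos hle, if_pos (by omega)]
      · rw [if_neg hle, if_neg (by omega)]

theorem getD_set_self' (l : List (List Int)) (i : Nat) (r : List Int) (h : i < l.length) :
    (l.set i r).getD i [] = r := by
  rw [List.getD_eq_getElem?_getD, List.getElem?_set_self h]; rfl

theorem getD_set_ne' (l : List (List Int)) (i i' : Nat) (r : List Int) (h : i ≠ i') :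
    (l.set i r).getD i' [] = l.getD i' [] := by
  rw [List.getD_eq_getElem?_getD, List.getElem?_set_ne h, ← List.getD_eq_getElem?_getD]

theorem LLrow_getD (A B : List String) (n i j : Nat) (hj : j < n) :
    (LLrow A B n i).getD j 0 = LL A B i j :=
  PySem.List.getD_map_range _ n j 0 hj

theorem LLpart_getD (A B : List String) (n i k j : Nat) (hj : j < n) :
    (LLpart A B n i k).getD j 0 = if j ≤ k then LL A B i j else 0 :=
  PySem.List.getD_map_range _ n j 0 hj

-- one full inner pass of lcsV2 writes row i of the LL table
theorem inner_fold (A B : List String) (n i : Nat) (hi : 1 ≤ i) :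
    ∀ (l : Nat), l ≤ n - 1 →
    ∀ (sup : List (List Int)), i < sup.length →
      sup.getD i [] = List.replicate n 0 →
      sup.getD (i - 1) [] = LLrow A B n (i - 1) →
    (List.range' 1 l).foldl (fun s j =>
        if A.getD (i - 1) "" = B.getD (j - 1) "" ∧ A.getD (i - 1) "" ≠ "" ∧ B.getD (j - 1) "" ≠ "" then
          set2 s i j (g2 s (i - 1) (j - 1) + 1)
        else if g2 s (i - 1) j ≥ g2 s i (j - 1) then
          set2 s i j (g2 s (i - 1) j)
        else
          set2 s i j (g2 s i (j - 1))) sup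
      = sup.set i (LLpart A B n i l) := by
  intro l
  induction l with
  | zero =>
    intro _ sup hlen hrowi _
    rw [List.range'_zero, List.foldl_nil, LLpart_zero, ← hrowi]
    have hgd : sup.getD i [] = sup[i] := by
      rw [List.getD_eq_getElem?_getD, List.getElem?_eq_getElem hlen]; rfl
    rw [hgd]
    exact (List.set_getElem_self hlen).symm
  | succ k ih =>
    intro hk sup hlen hrowi hprev
    rw [List.range'_1_concat, List.foldl_append, ih (by omega) sup hlen hrowi hprev]
    have hkn : 1 + k < n := by omega
    have hii : i - 1 ≠ i := by omega
    set sup' := sup.set i (LLpart A B n i k) with hsup'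
    have hgprev : ∀ j, j < n → g2 sup' (i - 1) j = LL A B (i - 1) j := by
      intro j hj
      rw [g2, hsup', getD_set_ne' _ _ _ _ (by omega), hprev, LLrow_getD A B n _ j hj]
    have hgcur : ∀ j, j < n → g2 sup' i j = (if j ≤ k then LL A B i j else 0) := by
      intro j hj
      rw [g2, hsup', getD_set_self' _ _ _ hlen, LLpart_getD A B n i k j hj]
    have hset : ∀ v, set2 sup' i (1 + k) v = sup.set i ((LLpart A B n i k).set (1 + k) v) := by
      intro v
      rw [set2, hsup', getD_set_self' _ _ _ hlen, List.set_set]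
    have h0 : ¬(i = 0 ∨ 1 + k = 0) := by omega
    have hone : (1 + k) - 1 = k := by omega
    rw [List.foldl_cons, List.foldl_nil]
    have hmain : (if A.getD (i - 1) "" = B.getD ((1 + k) - 1) "" ∧ A.getD (i - 1) "" ≠ "" ∧ B.getD ((1 + k) - 1) "" ≠ "" then
          set2 sup' i (1 + k) (g2 sup' (i - 1) ((1 + k) - 1) + 1)
        else if g2 sup' (i - 1) (1 + k) ≥ g2 sup' i ((1 + k) - 1) then
          set2 sup' i (1 + k) (g2 sup' (i - 1) (1 + k))
        else
          set2 sup' i (1 + k) (g2 sup' i ((1 + k) - 1)))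
        = set2 sup' i (1 + k) (LL A B i (1 + k)) := by
      rw [hone]
      rw [hgprev k (by omega), hgprev (1 + k) hkn, hgcur k (by omega), if_pos (le_refl k)]
      by_cases hc : A.getD (i - 1) "" = B.getD k "" ∧ A.getD (i - 1) "" ≠ "" ∧ B.getD k "" ≠ ""
      · rw [if_pos hc]
        have hcc : A.getD (i - 1) "" = B.getD ((1 + k) - 1) "" ∧ A.getD (i - 1) "" ≠ "" := by
          rw [hone]; exact ⟨hc.1, hc.2.1⟩
        rw [LL_match A B h0 hcc, hone]
      · rw [if_neg hc]
        have hc2 : ¬(A.getD (i - 1) "" = B.getD ((1 + k) - 1) "" ∧ A.getD (i - 1) "" ≠ "") := by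
          rw [hone]; intro hx; exact hc ⟨hx.1, hx.2, hx.1 ▸ hx.2⟩
        rw [LL_nomatch A B h0 hc2, hone]
        by_cases hge : LL A B (i - 1) (1 + k) ≥ LL A B i k
        · rw [if_pos hge]
          congr 1
          omega
        · rw [if_neg hge]
          congr 1
          omega
    rw [hmain, hset]
    have h1k : 1 + k = k + 1 := by omega
    rw [h1k, LLpart_set A B n i k (by omega)]

-- the matrix after the first k outer passes
def Mat (A B : List String) (m n k : Nat) : List (List Int) :=
  (List.range m).map (fun r => if r ≤ k then LLrow A B n r else List.replicate n 0)

theorem Mat_length (A B : List String) (m n k : Nat) : (Mat A B m n k).length = m := by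
  simp [Mat]

theorem Mat_getD (A B : List String) (m n k r : Nat) (hr : r < m) :
    (Mat A B m n k).getD r [] = if r ≤ k then LLrow A B n r else List.replicate n 0 :=
  PySem.List.getD_map_range _ m r [] hr

theorem Mat_zero (A B : List String) (m n : Nat) :
    Mat A B m n 0 = List.replicate m (List.replicate n 0) := by
  unfold Mat
  rw [List.eq_replicate_iff]
  constructor
  · simp
  · intro v hv
    obtain ⟨r, _, rfl⟩ := List.mem_map.mp hv
    split
    · next hr => rw [Nat.le_zero.mp hr, LLrow_zero]
    · rfl

theorem Mat_set (A B : List String) (m n k : Nat) (_h : k + 1 < m) :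
    (Mat A B m n k).set (k + 1) (LLrow A B n (k + 1)) = Mat A B m n (k + 1) := by
  apply List.ext_getElem
  · simp [Mat]
  · intro r h1 h2
    have hr : r < m := by simpa [Mat] using h2
    rw [List.getElem_set]
    unfold Mat
    simp only [List.getElem_map, List.getElem_range]
    by_cases hrk : k + 1 = r
    · subst hrk
      rw [if_pos rfl, if_pos (le_refl _)]
    · rw [if_neg hrk]
      by_cases hle : r ≤ k
      · rw [if_pos hle, if_pos (by omega)]
      · rw [if_neg hle, if_neg (by omega)]

theorem outer_fold (A B : List String) (m n : Nat) (hn : 1 ≤ n) :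
    ∀ (k : Nat), k ≤ m - 1 →
    (List.range' 1 k).foldl (fun s i =>
      (List.range' 1 (n - 1)).foldl (fun s j =>
        if A.getD (i - 1) "" = B.getD (j - 1) "" ∧ A.getD (i - 1) "" ≠ "" ∧ B.getD (j - 1) "" ≠ "" then
          set2 s i j (g2 s (i - 1) (j - 1) + 1)
        else if g2 s (i - 1) j ≥ g2 s i (j - 1) then
          set2 s i j (g2 s (i - 1) j)
        else
          set2 s i j (g2 s i (j - 1))) s) (Mat A B m n 0)
      = Mat A B m n k := by
  intro k
  induction k with
  | zero => intro _; rw [List.range'_zero, List.foldl_nil]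
  | succ k ih =>
    intro hk
    rw [List.range'_1_concat, List.foldl_append, ih (by omega), List.foldl_cons, List.foldl_nil]
    have hkm : 1 + k < m := by omega
    have h1 : (Mat A B m n k).getD (1 + k) [] = List.replicate n 0 := by
      rw [Mat_getD A B m n k (1 + k) hkm, if_neg (by omega)]
    have h2 : (Mat A B m n k).getD ((1 + k) - 1) [] = LLrow A B n ((1 + k) - 1) := by
      rw [Mat_getD A B m n k ((1 + k) - 1) (by omega), if_pos (by omega)]
    rw [inner_fold A B n (1 + k) (by omega) (n - 1) (le_refl _) (Mat A B m n k)
        (by rw [Mat_length]; omega) h1 h2]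
    rw [LLpart_last A B n (1 + k) hn]
    have : 1 + k = k + 1 := by omega
    rw [this, Mat_set A B m n k (by omega)]

theorem foldl_append_zeros (k : Nat) (init : List (List Int)) (r : List Int) :
    (List.range k).foldl (fun s _ => s ++ [r]) init = init ++ List.replicate k r := by
  induction k generalizing init with
  | zero => simp
  | succ n ih => rw [List.range_succ, List.foldl_append]; simp [ih, List.replicate_succ']

theorem foldl_append_zeros' (k : Nat) (init : List Int) :
    (List.range k).foldl (fun r _ => r ++ [(0 : Int)]) init = init ++ List.replicate k 0 := by
  induction k generalizing init with
  | zero => simp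
  | succ n ih => rw [List.range_succ, List.foldl_append]; simp [ih, List.replicate_succ']

theorem lcsV2_eq_LL (A B : List String) : lcsV2 A B = LL A B A.length B.length := by
  unfold lcsV2
  simp only [foldl_append_zeros, foldl_append_zeros', List.nil_append]
  rw [← Mat_zero A B (A.length + 1) (B.length + 1)]
  rw [outer_fold A B (A.length + 1) (B.length + 1) (by omega) (A.length + 1 - 1) (le_refl _)]
  have hA : A.length + 1 - 1 = A.length := by omega
  have hB : B.length + 1 - 1 = B.length := by omega
  rw [hA, hB, g2, Mat_getD A B (A.length + 1) (B.length + 1) A.length A.length (by omega),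
    if_pos (le_refl _), LLrow_getD A B (B.length + 1) A.length B.length (by omega)]

-- ---- memoised recursion computes LL ----
def MemoOK (A B : List String) (memo : PySem.Dict (Nat × Nat) Int) : Prop :=
  ∀ k v, memo.get? k = some v → v = LL A B k.1 k.2

theorem memoOK_insert {A B : List String} {memo : PySem.Dict (Nat × Nat) Int} {i j : Nat} {v : Int}
    (h : MemoOK A B memo) (hv : v = LL A B i j) : MemoOK A B (memo.insert (i, j) v) := by
  intro k w hk
  rw [PySem.Dict.get?_insert] at hk
  split at hk
  · next hkk =>
    cases hk
    rw [hkk]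
    exact hv
  · exact h k w hk

theorem go_correct (A B : List String) :
    ∀ (N i j : Nat) (memo : PySem.Dict (Nat × Nat) Int), i + j ≤ N → MemoOK A B memo →
    (lcsMemoGo A B i j memo).1 = LL A B i j ∧ MemoOK A B (lcsMemoGo A B i j memo).2 := by
  intro N
  induction N with
  | zero =>
    intro i j memo hN hok
    have hi : i = 0 := by omega
    rw [lcsMemoGo, if_pos (Or.inl hi)]
    exact ⟨(LL_base A B (Or.inl hi)).symm, hok⟩
  | succ N ih =>
    intro i j memo hN hok
    rw [lcsMemoGo]
    by_cases h0 : i = 0 ∨ j = 0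
    · rw [if_pos h0]
      exact ⟨(LL_base A B h0).symm, hok⟩
    · rw [if_neg h0]
      have hi : 1 ≤ i := by omega
      have hj : 1 ≤ j := by omega
      cases hget : memo.get? (i, j) with
      | some v =>
        exact ⟨hok (i, j) v hget, hok⟩
      | none =>
        simp only []
        by_cases hc : A.getD (i - 1) "" = B.getD (j - 1) "" ∧ A.getD (i - 1) "" ≠ ""
        · rw [if_pos hc]
          obtain ⟨h1, hok1⟩ := ih (i - 1) (j - 1) memo (by omega) hok
          constructor
          · simp only [h1]
            exact (LL_match A B h0 hc).symm
          · exact memoOK_insert hok1 (by rw [h1]; exact (LL_match A B h0 hc).symm)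
        · rw [if_neg hc]
          obtain ⟨h1, hok1⟩ := ih (i - 1) j memo (by omega) hok
          obtain ⟨h2, hok2⟩ := ih i (j - 1) (lcsMemoGo A B (i - 1) j memo).2 (by omega) hok1
          constructor
          · simp only [h1, h2]
            exact (LL_nomatch A B h0 hc).symm
          · exact memoOK_insert hok2 (by rw [h1, h2]; exact (LL_nomatch A B h0 hc).symm)

theorem lcs_eq (A B : List String) : lcsV3 A B = lcs_alt A B := by
  unfold lcsV3 lcs_alt
  by_cases hAB : A = B
  · rw [if_pos ((pyCmp_eq_zero_iff A B).mpr hAB), if_pos hAB]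
  · rw [if_neg (fun h => hAB ((pyCmp_eq_zero_iff A B).mp h)), if_neg hAB, lcsV2_eq_LL]
    have := go_correct A B (A.length + B.length) A.length B.length PySem.Dict.empty (le_refl _)
      (by intro k v hk; rw [PySem.Dict.get?_empty] at hk; cases hk)
    exact this.1.symm

-- ===== VERDICT (by name: the statement is the Claim_ definition above) =====
theorem calc_col_status_table_spec : Claim_equal_calc_col_status_table := by
  unfold Claim_equal_calc_col_status_table
  intro a b _ _
  unfold Spec_calc_col_status_table
  cases a with
  | nil => rfl
  | cons a0 as =>
    cases b with
    | nil =>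
      simp only [calc_col_status_table, calc_col_status_table_alt]
      rw [List.foldl_fixed]
    | cons b0 bs =>
      simp only [calc_col_status_table, calc_col_status_table_alt,
        List.length_map, List.length_range]
      apply congrArg Prod.fst
      apply PySem.List.foldl_congr_mem
      intro st x hx
      have hx' : x < a0.length := List.mem_range.mp hx
      have hA : ((List.range a0.length).map
          (fun x => (a0 :: as).map (fun row => row.getD x ""))).getD x []
          = column (a0 :: as) x :=
        PySem.List.getD_map_range _ a0.length x [] hx'
      rw [hA]
      have hinner : ∀ (s0 : Int × Int × Bool),
          (List.range' st.2 (b0.length - st.2)).foldl (fun (s : Int × Int × Bool) y =>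
            if s.2.2 then s else
            let lenA : Int := (column (a0 :: as) x).length
            let lenB : Int := (column (b0 :: bs) y).length
            let t := lcsV3 (column (a0 :: as) x) (column (b0 :: bs) y)
            let s' := if s.1 < t then (t, (y : Int), s.2.2) else s
            if t = lenA ∨ t = lenB then (s'.1, s'.2.1, true) else s') s0
          = (List.range' st.2 (b0.length - st.2)).foldl (fun (s : Int × Int × Bool) y =>
            if s.2.2 then s else
            let colB := ((List.range b0.length).map
              (fun y => (b0 :: bs).map (fun row => row.getD y ""))).getD y []
            let t := lcs_alt (column (a0 :: as) x) colB
            let s' := if s.1 < t then (t, (y : Int), s.2.2) else s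
            if t = ((column (a0 :: as) x).length : Int) ∨ t = (colB.length : Int)
            then (s'.1, s'.2.1, true) else s') s0 := by
        intro s0
        apply PySem.List.foldl_congr_mem
        intro s y hy
        have hy' : y < b0.length := by
          have := List.mem_range'_1.mp hy
          omega
        have hB : ((List.range b0.length).map
            (fun y => (b0 :: bs).map (fun row => row.getD y ""))).getD y []
            = column (b0 :: bs) y :=
          PySem.List.getD_map_range _ b0.length y [] hy'
        rw [hB, lcs_eq]
      rw [hinner]
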